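-- pv_equiv track=rewrite | github.com/donc0n/fm2gp | 2-1.py | addition_chain
-- ===== SOURCE A (Python) =====
-- def addition_chain(N):
--     chains = [[] for i in range(N+1)] # chains[i] 는 i를 최소의 addition횟수로 구할 수 있는 chain들의 리스트이다.
--     chains[1] = [[1]]
--     for i, r in enumerate(chains):
--         level = 100
--         # 레벨의 최솟값을 구한다.
--         for j in range(i//2, 0, -1): # i-j > j
--             for sub in chains[i-j]:
--                 if j in sub:
--                     level = min(len(sub), level)
--         # 최소 레벨의 경로를 갱신한다.
--         for j in range(i//2, 0, -1):
--             for sub in chains[i-j]: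
--                 if len(sub) == level and j in sub:
--                     chains[i].append(sub +[i])
--     return chains
-- ===== SOURCE B (Python) =====
-- def addition_chain(N):
--     # Single sweep per i: keep the best (smallest) qualifying chain length seen so
--     # far and the bucket of minimal chains, resetting the bucket whenever a strictly
--     # shorter qualifying chain appears.  100 acts as infinity: it exceeds the length
--     # of any minimal addition chain for representable i, as in A.
--     chains = [[], [[1]]]
--     for i in range(2, N + 1):
--         best = 100
--         bucket = []
--         for j in range(i // 2, 0, -1):
--             for sub in chains[i - j]:
--                 if j in sub:
--                     if len(sub) < best:
--                         best = len(sub)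
--                         bucket = [sub + [i]]
--                     elif len(sub) == best:
--                         bucket.append(sub + [i])
--         chains.append(bucket)
--     return chains
-- ===== Notes on version B (the rewrite author's own statement) =====
-- stated objective: alternative
-- what changed: Replaces A's two sweeps per i (one pass to find the minimal qualifying chain length, a second pass over the same nested j/sub iteration to collect matching chains) by a single sweep maintaining a running best length and a bucket that is reset on a strictly shorter chain, and grows the chains list by append instead of preallocating and mutating it in place.
import Mathlib
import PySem

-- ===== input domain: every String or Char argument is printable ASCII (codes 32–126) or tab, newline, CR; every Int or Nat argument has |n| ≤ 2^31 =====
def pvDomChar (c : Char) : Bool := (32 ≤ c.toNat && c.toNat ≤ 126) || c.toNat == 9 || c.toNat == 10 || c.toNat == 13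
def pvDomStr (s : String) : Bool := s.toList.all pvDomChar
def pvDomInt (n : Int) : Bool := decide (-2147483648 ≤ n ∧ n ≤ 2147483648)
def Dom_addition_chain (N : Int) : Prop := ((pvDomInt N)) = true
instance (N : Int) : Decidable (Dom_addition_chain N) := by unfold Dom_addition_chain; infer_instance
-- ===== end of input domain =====

-- B replaces A's two sweeps per i (find minimal level, then collect) by one sweep with a
-- running best length and a reset-or-append bucket, growing the chains list by append;
-- alternative decomposition, same cost.  (A mutates nothing observable; return value only.)


-- ===== PORT A =====
-- Literal port of A.  'for i, r in enumerate(chains)' with r unused is iteration over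
-- the indices 0 .. len(chains)-1 reading/writing the evolving list, rendered as a fold
-- over List.range chains.length.  All chains[i-j] reads are in range (1 ≤ i-j < len),
-- so pyGetD with default [] is exact there.
def addition_chain (N : Int) : List (List (List Int)) :=
  let chains : List (List (List Int)) :=
    ((PySem.List.pyRange 0 (N + 1) 1).map (fun _ => ([] : List (List Int)))).set 1 [[1]]
  (List.range chains.length).foldl
    (fun chains (i : Nat) =>
      let level : Int :=
        (PySem.List.pyRange (PySem.Int.floordiv (i : Int) 2) 0 (-1)).foldl
          (fun level j =>
            (PySem.List.pyGetD chains ((i : Int) - j) []).foldl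
              (fun level sub => if j ∈ sub then min ((sub.length : Int)) level else level)
              level)
          100
      (PySem.List.pyRange (PySem.Int.floordiv (i : Int) 2) 0 (-1)).foldl
        (fun chains j =>
          (PySem.List.pyGetD chains ((i : Int) - j) []).foldl
            (fun chains sub =>
              if (sub.length : Int) = level ∧ j ∈ sub then
                chains.set i (chains.getD i [] ++ [sub ++ [(i : Int)]])
              else chains)
            chains)
        chains)
    chains

-- ===== PORT B =====
def addition_chain_alt (N : Int) : List (List (List Int)) :=
  (PySem.List.pyRange 2 (N + 1) 1).foldl
    (fun chains (i : Int) =>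
      let s : Int × List (List Int) :=
        (PySem.List.pyRange (PySem.Int.floordiv i 2) 0 (-1)).foldl
          (fun s j =>
            (PySem.List.pyGetD chains (i - j) []).foldl
              (fun (s : Int × List (List Int)) (sub : List Int) =>
                if j ∈ sub then
                  if (sub.length : Int) < s.1 then ((sub.length : Int), [sub ++ [i]])
                  else if (sub.length : Int) = s.1 then (s.1, s.2 ++ [sub ++ [i]])
                  else s
                else s)
              s)
          ((100 : Int), ([] : List (List Int)))
      chains ++ [s.2])
    ([[], [[1]]] : List (List (List Int)))

-- ===== PRECONDITION & SPEC =====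
-- A raises IndexError for N ≤ 0 (the 'chains[1] = [[1]]' assignment on a list of length < 2).
def Pre_addition_chain (N : Int) : Prop := 1 ≤ N
instance (N : Int) : Decidable (Pre_addition_chain N) := by unfold Pre_addition_chain; infer_instance
def pvWitness_addition_chain : Int := (3)

def Spec_addition_chain (N : Int) (out : List (List (List Int))) : Prop := out = addition_chain_alt N
instance (N : Int) (out : List (List (List Int))) : Decidable (Spec_addition_chain N out) := by unfold Spec_addition_chain; infer_instance

-- ===== CLAIM (what is proved, stated in full; the proofs are below) =====
def Claim_equal_addition_chain : Prop := ∀ (N : Int), Dom_addition_chain N → Pre_addition_chain N → Spec_addition_chain N (addition_chain N)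

-- ===== LEMMAS AND PROOFS =====

-- A's per-i step (the body of A's outer fold), named for the proofs.
def pvStepA (chains : List (List (List Int))) (i : Nat) : List (List (List Int)) :=
  let level : Int :=
    (PySem.List.pyRange (PySem.Int.floordiv (i : Int) 2) 0 (-1)).foldl
      (fun level j =>
        (PySem.List.pyGetD chains ((i : Int) - j) []).foldl
          (fun level sub => if j ∈ sub then min ((sub.length : Int)) level else level)
          level)
      100
  (PySem.List.pyRange (PySem.Int.floordiv (i : Int) 2) 0 (-1)).foldl
    (fun chains j =>
      (PySem.List.pyGetD chains ((i : Int) - j) []).foldl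
        (fun chains sub =>
          if (sub.length : Int) = level ∧ j ∈ sub then
            chains.set i (chains.getD i [] ++ [sub ++ [(i : Int)]])
          else chains)
        chains)
    chains

-- B's per-i step (the body of B's fold).
def pvStepB (chains : List (List (List Int))) (i : Int) : List (List (List Int)) :=
  let s : Int × List (List Int) :=
    (PySem.List.pyRange (PySem.Int.floordiv i 2) 0 (-1)).foldl
      (fun s j =>
        (PySem.List.pyGetD chains (i - j) []).foldl
          (fun (s : Int × List (List Int)) (sub : List Int) =>
            if j ∈ sub then
              if (sub.length : Int) < s.1 then ((sub.length : Int), [sub ++ [i]])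
              else if (sub.length : Int) = s.1 then (s.1, s.2 ++ [sub ++ [i]])
              else s
            else s)
          s)
      ((100 : Int), ([] : List (List Int)))
  chains ++ [s.2]

def pvInit (N : Int) : List (List (List Int)) :=
  ((PySem.List.pyRange 0 (N + 1) 1).map (fun _ => ([] : List (List Int)))).set 1 [[1]]

lemma addition_chain_eq (N : Int) :
    addition_chain N = (List.range (pvInit N).length).foldl pvStepA (pvInit N) := rfl

lemma addition_chain_alt_eq (N : Int) :
    addition_chain_alt N = (PySem.List.pyRange 2 (N + 1) 1).foldl pvStepB [[], [[1]]] := rfl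

-- candidate stream of step i read from a frozen chains list
def pvCands (chains : List (List (List Int))) (i : Int) : List (Int × List Int) :=
  (PySem.List.pyRange (PySem.Int.floordiv i 2) 0 (-1)).flatMap
    (fun j => (PySem.List.pyGetD chains (i - j) []).map (fun sub => (j, sub)))

def pvMin (cs : List (Int × List Int)) (b : Int) : Int :=
  cs.foldl (fun b p => if p.1 ∈ p.2 then min ((p.2.length : Int)) b else b) b

def pvCollect (i lvl : Int) (cs : List (Int × List Int)) (acc : List (List Int)) : List (List Int) :=
  cs.foldl (fun acc p => if ((p.2.length : Int) = lvl ∧ p.1 ∈ p.2) then acc ++ [p.2 ++ [i]] else acc) acc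

def pvSingle (i : Int) (cs : List (Int × List Int)) (s : Int × List (List Int)) : Int × List (List Int) :=
  cs.foldl
    (fun s p =>
      if p.1 ∈ p.2 then
        if ((p.2.length : Int)) < s.1 then (((p.2.length : Int)), [p.2 ++ [i]])
        else if ((p.2.length : Int)) = s.1 then (s.1, s.2 ++ [p.2 ++ [i]])
        else s
      else s)
    s

-- a nested (j, then sub) fold is the fold over the flattened candidate stream
lemma nested_flat {s : Type} (g : Int -> List (List Int)) (f : s -> Int -> List Int -> s) :
    forall (js : List Int) (s0 : s),
      js.foldl (fun s j => (g j).foldl (fun s sub => f s j sub) s) s0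
        = (js.flatMap (fun j => (g j).map (fun sub => (j, sub)))).foldl (fun s p => f s p.1 p.2) s0 := by
  intro js
  induction js with
  | nil => intro s0; rfl
  | cons j js ih => intro s0; simp only [List.foldl_cons, List.flatMap_cons, List.foldl_append, List.foldl_map, ih]

lemma pvMin_cons (p : Int × List Int) (cs : List (Int × List Int)) (b : Int) :
    pvMin (p :: cs) b = pvMin cs (if p.1 ∈ p.2 then min ((p.2.length : Int)) b else b) := rfl

lemma pvCollect_cons (i lvl : Int) (p : Int × List Int) (cs : List (Int × List Int)) (acc : List (List Int)) :
    pvCollect i lvl (p :: cs) acc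
      = pvCollect i lvl cs (if ((p.2.length : Int) = lvl ∧ p.1 ∈ p.2) then acc ++ [p.2 ++ [i]] else acc) := rfl

lemma pvSingle_cons (i : Int) (p : Int × List Int) (cs : List (Int × List Int)) (b : Int) (acc : List (List Int)) :
    pvSingle i (p :: cs) (b, acc)
      = pvSingle i cs
          (if p.1 ∈ p.2 then
            if ((p.2.length : Int)) < b then (((p.2.length : Int)), [p.2 ++ [i]])
            else if ((p.2.length : Int)) = b then (b, acc ++ [p.2 ++ [i]])
            else (b, acc)
          else (b, acc)) := rfl

lemma pvMin_le (cs : List (Int × List Int)) : forall b : Int, pvMin cs b <= b := by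
  induction cs with
  | nil => intro b; exact le_refl b
  | cons p cs ih =>
      intro b
      rw [pvMin_cons]
      refine le_trans (ih _) ?_
      split
      · exact min_le_right _ _
      · exact le_refl b

-- single sweep = (min sweep, filter sweep)
lemma pvSingle_eq (i : Int) (cs : List (Int × List Int)) :
    forall (b : Int) (acc : List (List Int)),
      pvSingle i cs (b, acc)
        = (pvMin cs b, pvCollect i (pvMin cs b) cs (if pvMin cs b = b then acc else [])) := by
  induction cs with
  | nil => intro b acc; simp [pvSingle, pvMin, pvCollect]
  | cons p cs ih =>
      intro b acc
      rw [pvSingle_cons, pvMin_cons, pvCollect_cons]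
      by_cases hq : p.1 ∈ p.2
      · rcases lt_trichotomy ((p.2.length : Int)) b with hlt | heq | hgt
        · have eL : (if p.1 ∈ p.2 then
              if ((p.2.length : Int)) < b then (((p.2.length : Int)), [p.2 ++ [i]])
              else if ((p.2.length : Int)) = b then (b, acc ++ [p.2 ++ [i]])
              else (b, acc)
            else (b, acc)) = (((p.2.length : Int)), [p.2 ++ [i]]) := by
            rw [if_pos hq, if_pos hlt]
          have eR : (if p.1 ∈ p.2 then min ((p.2.length : Int)) b else b) = ((p.2.length : Int)) := by
            rw [if_pos hq, min_eq_left hlt.le]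
          rw [eL, eR, ih]
          have hle := pvMin_le cs ((p.2.length : Int))
          rw [if_neg (by omega : ¬ pvMin cs ((p.2.length : Int)) = b)]
          congr 1
          by_cases h2 : pvMin cs ((p.2.length : Int)) = (p.2.length : Int)
          · rw [if_pos h2, if_pos ⟨h2.symm, hq⟩, List.nil_append]
          · rw [if_neg h2, if_neg (fun h => h2 h.1.symm)]
        · have eL : (if p.1 ∈ p.2 then
              if ((p.2.length : Int)) < b then (((p.2.length : Int)), [p.2 ++ [i]])
              else if ((p.2.length : Int)) = b then (b, acc ++ [p.2 ++ [i]])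
              else (b, acc)
            else (b, acc)) = (b, acc ++ [p.2 ++ [i]]) := by
            rw [if_pos hq, if_neg (by omega), if_pos heq]
          have eR : (if p.1 ∈ p.2 then min ((p.2.length : Int)) b else b) = b := by
            rw [if_pos hq, heq, min_self]
          rw [eL, eR, ih]
          congr 1
          by_cases h2 : pvMin cs b = b
          · rw [if_pos h2, if_pos h2, if_pos ⟨heq.trans h2.symm, hq⟩]
          · have hlen : ¬ ((p.2.length : Int) = pvMin cs b) := fun h => h2 (h.symm.trans heq)
            rw [if_neg h2, if_neg h2, if_neg (fun h => hlen h.1)]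
        · have eL : (if p.1 ∈ p.2 then
              if ((p.2.length : Int)) < b then (((p.2.length : Int)), [p.2 ++ [i]])
              else if ((p.2.length : Int)) = b then (b, acc ++ [p.2 ++ [i]])
              else (b, acc)
            else (b, acc)) = (b, acc) := by
            rw [if_pos hq, if_neg (by omega), if_neg (by omega)]
          have eR : (if p.1 ∈ p.2 then min ((p.2.length : Int)) b else b) = b := by
            rw [if_pos hq, min_eq_right hgt.le]
          rw [eL, eR, ih]
          have hle := pvMin_le cs b
          congr 1
          have hne : ¬ ((p.2.length : Int) = pvMin cs b ∧ p.1 ∈ p.2) := by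
            intro h
            have h1 := h.1
            omega
          rw [if_neg hne]
      · have eL : (if p.1 ∈ p.2 then
              if ((p.2.length : Int)) < b then (((p.2.length : Int)), [p.2 ++ [i]])
              else if ((p.2.length : Int)) = b then (b, acc ++ [p.2 ++ [i]])
              else (b, acc)
            else (b, acc)) = (b, acc) := by
          rw [if_neg hq]
        have eR : (if p.1 ∈ p.2 then min ((p.2.length : Int)) b else b) = b := by
          rw [if_neg hq]
        rw [eL, eR, ih]
        congr 1
        have hne : ¬ (((p.2.length : Int) = pvMin cs b) ∧ p.1 ∈ p.2) := fun h => hq h.2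
        rw [if_neg hne]

lemma pyGetD_set_of_lt (l : List (List (List Int))) (n : Nat) (v : List (List Int)) (k : Int)
    (h0 : 0 <= k) (hk : k < (n : Int)) (d : List (List Int)) :
    PySem.List.pyGetD (l.set n v) k d = PySem.List.pyGetD l k d := by
  have hk' : k = ((k.toNat : Nat) : Int) := (Int.toNat_of_nonneg h0).symm
  have hne : n ≠ k.toNat := by omega
  rw [hk', PySem.List.pyGetD_natCast, PySem.List.pyGetD_natCast]
  simp [List.getD_eq_getElem?_getD, List.getElem?_set_ne hne]

lemma pyGetD_append_left (xs ys : List (List (List Int))) (k : Int)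
    (h0 : 0 <= k) (hk : k < (xs.length : Int)) (d : List (List Int)) :
    PySem.List.pyGetD (xs ++ ys) k d = PySem.List.pyGetD xs k d := by
  have hk' : k = ((k.toNat : Nat) : Int) := (Int.toNat_of_nonneg h0).symm
  have hlt : k.toNat < xs.length := by omega
  rw [hk', PySem.List.pyGetD_natCast, PySem.List.pyGetD_natCast]
  simp [List.getD_eq_getElem?_getD, List.getElem?_append_left hlt]

lemma set_append_length {A : Type} (xs : List A) (y : A) (ys : List A) (v : A) :
    (xs ++ y :: ys).set xs.length v = xs ++ v :: ys := by
  induction xs with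
  | nil => rfl
  | cons a xs ih => simp [ih]

-- A's second pass, as a set of a frozen-collect
lemma pass2_inner (i : Nat) (level j : Int) (chains : List (List (List Int))) (hi : i < chains.length) :
    forall (subs : List (List Int)) (acc : List (List Int)),
      subs.foldl
          (fun ch sub =>
            if (sub.length : Int) = level ∧ j ∈ sub then ch.set i (ch.getD i [] ++ [sub ++ [(i : Int)]]) else ch)
          (chains.set i (chains.getD i [] ++ acc))
        = chains.set i (chains.getD i [] ++
            subs.foldl (fun acc sub => if (sub.length : Int) = level ∧ j ∈ sub then acc ++ [sub ++ [(i : Int)]] else acc) acc) := by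
  intro subs
  induction subs with
  | nil => intro acc; rfl
  | cons sub subs ih =>
      intro acc
      rw [List.foldl_cons, List.foldl_cons]
      by_cases hc : (sub.length : Int) = level ∧ j ∈ sub
      · rw [if_pos hc, if_pos hc]
        have hget : (chains.set i (chains.getD i [] ++ acc)).getD i []
            = chains.getD i [] ++ acc := by
          simp [List.getD_eq_getElem?_getD, List.getElem?_set_self hi]
        rw [hget, List.set_set, List.append_assoc]
        exact ih (acc ++ [sub ++ [(i : Int)]])
      · rw [if_neg hc, if_neg hc]
        exact ih acc

lemma pass2 (i : Nat) (level : Int) (chains : List (List (List Int))) (hi : i < chains.length) :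
    forall (js : List Int), (forall j, j ∈ js -> 1 <= j ∧ j <= (i : Int)) ->
    forall (acc : List (List Int)),
      js.foldl
          (fun ch j =>
            (PySem.List.pyGetD ch ((i : Int) - j) []).foldl
              (fun ch sub =>
                if (sub.length : Int) = level ∧ j ∈ sub then ch.set i (ch.getD i [] ++ [sub ++ [(i : Int)]]) else ch)
              ch)
          (chains.set i (chains.getD i [] ++ acc))
        = chains.set i (chains.getD i [] ++
            pvCollect (i : Int) level
              (js.flatMap (fun j => (PySem.List.pyGetD chains ((i : Int) - j) []).map (fun sub => (j, sub)))) acc) := by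
  intro js
  induction js with
  | nil => intro hj acc; rfl
  | cons j js ih =>
      intro hj acc
      have hj1 := hj j (List.mem_cons_self)
      rw [List.foldl_cons]
      have hread : PySem.List.pyGetD (chains.set i (chains.getD i [] ++ acc)) ((i : Int) - j) []
          = PySem.List.pyGetD chains ((i : Int) - j) [] :=
        pyGetD_set_of_lt chains i _ ((i : Int) - j) (by omega) (by omega) []
      rw [hread, pass2_inner i level j chains hi]
      rw [ih (fun x hx => hj x (List.mem_cons_of_mem _ hx))]
      simp only [pvCollect, List.flatMap_cons, List.foldl_append, List.foldl_map]

lemma pvStepA_zero (chains : List (List (List Int))) : pvStepA chains 0 = chains := by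
  have hr : PySem.List.pyRange 0 0 (-1) = [] := PySem.List.pyRange_neg_one_eq_nil (le_refl 0)
  simp [pvStepA, hr]

lemma pvStepA_one (chains : List (List (List Int))) : pvStepA chains 1 = chains := by
  have hr : PySem.List.pyRange 0 0 (-1) = [] := PySem.List.pyRange_neg_one_eq_nil (le_refl 0)
  simp [pvStepA, hr]

lemma flatMap_congr_mem {A B : Type} (l : List A) (f g : A -> List B)
    (h : forall x, x ∈ l -> f x = g x) : l.flatMap f = l.flatMap g := by
  induction l with
  | nil => rfl
  | cons a l ih =>
      simp only [List.flatMap_cons, h a List.mem_cons_self,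
        ih (fun x hx => h x (List.mem_cons_of_mem _ hx))]

lemma set_getD_self {A : Type} (l : List A) (n : Nat) (hn : n < l.length) (d : A) :
    l.set n (l.getD n d) = l := by
  apply List.ext_getElem?
  intro m
  by_cases hm : m = n
  · subst hm
    simp [List.getD_eq_getElem?_getD, List.getElem?_eq_getElem hn]
  · rw [List.getElem?_set_ne (fun e => hm e.symm)]

-- the per-i step of A on B's prefix padded with empties agrees with B's step
lemma stepAB (Bn pad : List (List (List Int))) (k : Nat) (hk : Bn.length = k) (h2 : 2 <= k) :
    pvStepA (Bn ++ [] :: pad) k = pvStepB Bn (k : Int) ++ pad := by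
  have hfl : PySem.Int.floordiv ((k : Int)) 2 = (k : Int) / 2 :=
    PySem.Int.floordiv_eq_ediv_of_pos (by norm_num)
  have hjs : forall j, j ∈ PySem.List.pyRange ((k : Int) / 2) 0 (-1) -> 1 <= j ∧ j <= (k : Int) := by
    intro j hj
    rw [PySem.List.mem_pyRange_neg_one] at hj
    omega
  have hik : k < (Bn ++ [] :: pad).length := by simp [hk]
  -- reads of chains[k-j] only see the Bn prefix
  have hread : forall j, j ∈ PySem.List.pyRange ((k : Int) / 2) 0 (-1) ->
      PySem.List.pyGetD (Bn ++ [] :: pad) ((k : Int) - j) [] = PySem.List.pyGetD Bn ((k : Int) - j) [] := by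
    intro j hj
    have hb := hjs j hj
    exact pyGetD_append_left Bn ([] :: pad) ((k : Int) - j) (by omega) (by simp [hk]; omega) []
  have hcand : ((PySem.List.pyRange ((k : Int) / 2) 0 (-1)).flatMap
        (fun j => (PySem.List.pyGetD (Bn ++ [] :: pad) ((k : Int) - j) []).map (fun sub => (j, sub))))
      = ((PySem.List.pyRange ((k : Int) / 2) 0 (-1)).flatMap
        (fun j => (PySem.List.pyGetD Bn ((k : Int) - j) []).map (fun sub => (j, sub)))) := by
    apply flatMap_congr_mem
    intro j hj
    rw [hread j hj]
  simp only [pvStepA, pvStepB, hfl]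
  rw [nested_flat (fun j => PySem.List.pyGetD (Bn ++ [] :: pad) ((k : Int) - j) [])
    (fun level j sub => if j ∈ sub then min ((sub.length : Int)) level else level)]
  rw [nested_flat (fun j => PySem.List.pyGetD Bn ((k : Int) - j) [])
    (fun (s : Int × List (List Int)) j (sub : List Int) =>
      if j ∈ sub then
        if (sub.length : Int) < s.1 then ((sub.length : Int), [sub ++ [(k : Int)]])
        else if (sub.length : Int) = s.1 then (s.1, s.2 ++ [sub ++ [(k : Int)]])
        else s
      else s)]
  rw [hcand]
  have hsingle := pvSingle_eq (k : Int)
    ((PySem.List.pyRange ((k : Int) / 2) 0 (-1)).flatMap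
      (fun j => (PySem.List.pyGetD Bn ((k : Int) - j) []).map (fun sub => (j, sub)))) 100 []
  simp only [pvSingle, pvMin, pvCollect] at hsingle
  rw [hsingle]
  -- second pass of A
  have hstart : (Bn ++ [] :: pad) = (Bn ++ [] :: pad).set k ((Bn ++ [] :: pad).getD k [] ++ []) := by
    rw [List.append_nil, set_getD_self _ k hik]
  conv_lhs => rw [hstart]
  rw [pass2 k _ (Bn ++ [] :: pad) hik _ hjs []]
  rw [hcand]
  simp only [pvCollect]
  -- assemble
  have hgd : (Bn ++ [] :: pad).getD k [] = ([] : List (List Int)) := by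
    rw [List.getD_eq_getElem?_getD, ← hk, List.getElem?_append_right (le_refl Bn.length)]
    simp
  have hset : forall v, (Bn ++ [] :: pad).set k v = Bn ++ v :: pad := by
    intro v
    rw [← hk, set_append_length]
  rw [hgd, hset, List.nil_append, ite_self, List.append_cons]
  rfl

def pvB (n : Nat) : List (List (List Int)) :=
  (PySem.List.pyRange 2 (2 + (n : Int)) 1).foldl pvStepB [[], [[1]]]

lemma main_aux (N : Int) (hN : 1 <= N) :
    forall (n : Nat), (2 + (n : Int)) <= N + 1 ->
      (List.range (2 + n)).foldl pvStepA (pvInit N)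
          = pvB n ++ List.replicate ((N + 1).toNat - (2 + n)) []
        ∧ (pvB n).length = 2 + n := by
  intro n
  induction n with
  | zero =>
      intro hle
      have hM2 : 2 <= (N + 1).toNat := by omega
      have hB0 : pvB 0 = [[], [[1]]] := by
        unfold pvB
        norm_num [PySem.List.pyRange_one_eq_nil]
      refine ⟨?_, by rw [hB0]; rfl⟩
      have h01 : (List.range (2 + 0)).foldl pvStepA (pvInit N) = pvInit N := by
        show (List.range 2).foldl pvStepA (pvInit N) = _
        simp [List.range_succ, pvStepA_zero, pvStepA_one]
      rw [h01, hB0]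
      unfold pvInit
      rw [List.map_const', PySem.List.length_pyRange_one]
      have hM : (N + 1 - 0).toNat = ((N + 1).toNat - 2) + 1 + 1 := by omega
      rw [hM, List.replicate_succ, List.replicate_succ]
      rfl
  | succ n ih =>
      intro hle
      have hle' : (2 + (n : Int)) <= N + 1 := by push_cast at hle ⊢; omega
      obtain ⟨hA, hL⟩ := ih hle'
      have hstep : pvB (n + 1) = pvStepB (pvB n) ((2 + n : Nat) : Int) := by
        have hr : PySem.List.pyRange 2 (2 + ((n + 1 : Nat) : Int)) 1
            = PySem.List.pyRange 2 (2 + (n : Int)) 1 ++ [2 + (n : Int)] := by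
          push_cast
          rw [show (2 : Int) + ((n : Int) + 1) = (2 + (n : Int)) + 1 by ring,
            PySem.List.pyRange_one_succ_right (by omega)]
        unfold pvB
        rw [hr, List.foldl_append]
        norm_num
      constructor
      · have hpad : (N + 1).toNat - (2 + n) = ((N + 1).toNat - (2 + (n + 1))) + 1 := by
          push_cast at hle
          omega
        rw [show 2 + (n + 1) = (2 + n) + 1 from rfl, List.range_succ, List.foldl_append,
          List.foldl_cons, List.foldl_nil, hA, hpad, List.replicate_succ]
        rw [stepAB (pvB n) _ (2 + n) hL (by omega)]
        rw [hstep]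
        rfl
      · rw [hstep]
        simp only [pvStepB, List.length_append, hL, List.length_cons, List.length_nil]
        omega

-- ===== VERDICT (by name: the statement is the Claim_ definition above) =====
theorem addition_chain_spec : Claim_equal_addition_chain := by
  intro N hdom hpre
  have hpre' : (1 : Int) <= N := hpre
  unfold Spec_addition_chain
  rw [addition_chain_eq, addition_chain_alt_eq]
  have hM : (pvInit N).length = (N + 1).toNat := by
    unfold pvInit
    simp [PySem.List.length_pyRange_one]
  have h2 : 2 <= (N + 1).toNat := by omega
  obtain ⟨hA, _⟩ := main_aux N hpre' ((N + 1).toNat - 2) (by omega)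
  rw [hM, show (N + 1).toNat = 2 + ((N + 1).toNat - 2) by omega, hA]
  rw [show (N + 1).toNat - (2 + ((N + 1).toNat - 2)) = 0 by omega]
  rw [List.replicate_zero, List.append_nil]
  unfold pvB
  rw [show (2 + (((N + 1).toNat - 2 : Nat) : Int)) = N + 1 by omega]
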